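-- pv_equiv track=rewrite | github.com/fjucs/1082-numerical | hw4/main.py | calc_terms
-- ===== SOURCE A (Python) =====
-- def sum(x, y=None, px=1, py=1):
-- 	# if none
--     if y is None:
--         y = [1] * len(x)
--     if x is None:
--         x = [1] * len(y)
--     # calc
--     tmp = 0
--     for a, b in zip(x, y):
--         tmp += (a ** px) * (b ** py)
--     return tmp
--
-- def calc_terms(n, x, y):
-- 	# Calc for x_i
-- 	left = []
-- 	for i in range(1, 2*n+1):
-- 		left.append(sum(x, None, i))
-- 	# Calc for x_i^n y_i
-- 	right = [sum(None, y)]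
-- 	for i in range(1, n+1):
-- 		right.append(sum(x, y, i, 1))
-- 	return (left, right)
-- ===== SOURCE B (Python) =====
-- def calc_terms(n, x, y):
--     L = 2 * n if n > 0 else 0
--     R = n if n > 0 else 0
--     # power-sums of x: single outer pass over elements, running power inside
--     left = [0] * L
--     for a in x:
--         p = 1
--         out = []
--         for v in left:
--             p *= a
--             out.append(v + p)
--         left = out
--     # right[0]: plain sum of y
--     r0 = 0
--     for b in y:
--         r0 += b
--     # cross sums over zip(x, y), running power p = b * a**i
--     rest = [0] * R
--     for a, b in zip(x, y):
--         p = b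
--         out = []
--         for v in rest:
--             p *= a
--             out.append(v + p)
--         rest = out
--     return (left, [r0] + rest)
-- ===== Notes on version B (the rewrite author's own statement) =====
-- stated objective: alternative
-- what changed: B transposes the loop nest: instead of calling a generic power-sum helper once per exponent (recomputing a**i from scratch each time), it makes one outer pass per element maintaining a running power p *= a across the exponent axis, and computes right[0] as a plain sum of y.
import Mathlib
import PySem

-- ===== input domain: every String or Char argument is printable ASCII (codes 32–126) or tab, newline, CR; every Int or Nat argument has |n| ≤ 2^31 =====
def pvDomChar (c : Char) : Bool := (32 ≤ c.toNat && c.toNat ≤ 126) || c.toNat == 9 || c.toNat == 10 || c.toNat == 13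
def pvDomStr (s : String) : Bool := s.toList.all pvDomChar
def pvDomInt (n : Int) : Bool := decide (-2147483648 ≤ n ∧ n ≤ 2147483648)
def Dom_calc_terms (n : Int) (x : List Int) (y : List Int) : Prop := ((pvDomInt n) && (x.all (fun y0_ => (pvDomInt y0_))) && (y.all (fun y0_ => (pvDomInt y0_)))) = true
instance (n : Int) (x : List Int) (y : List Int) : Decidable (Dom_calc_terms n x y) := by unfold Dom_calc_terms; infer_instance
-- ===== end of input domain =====

-- B transposes A's loop nest (one outer pass per element with a running power, right[0] a plain
-- sum of y) instead of one generic power-sum helper call per exponent; same exact integer result.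

-- ===== PORT A =====
-- Python's `a ** e` is `a ^ e.toNat` here; every call site passes an exponent ≥ 1, where they agree.
def pySumA (xo yo : Option (List Int)) (px py : Int) : Int :=
  let y := match yo with
    | none => List.replicate (xo.getD []).length 1
    | some y => y
  let x := match xo with
    | none => List.replicate y.length 1
    | some x => x
  (x.zip y).foldl (fun tmp ab => tmp + ab.1 ^ px.toNat * ab.2 ^ py.toNat) 0

def calc_terms (n : Int) (x : List Int) (y : List Int) : List Int × List Int :=
  let left := (PySem.List.pyRange 1 (2*n+1) 1).foldl
    (fun acc i => acc ++ [pySumA (some x) none i 1]) ([] : List Int)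
  let right := (PySem.List.pyRange 1 (n+1) 1).foldl
    (fun acc i => acc ++ [pySumA (some x) (some y) i 1]) [pySumA none (some y) 1 1]
  (left, right)

-- ===== PORT B =====
-- inner `for v in vs: p *= a; out.append(v + p)` with state (out, p)
def sweepB (a p0 : Int) (vs : List Int) : List Int × Int :=
  vs.foldl (fun (s : List Int × Int) v => (s.1 ++ [v + s.2 * a], s.2 * a)) (([] : List Int), p0)

def calc_terms_alt (n : Int) (x : List Int) (y : List Int) : List Int × List Int :=
  let L : Nat := if n > 0 then (2*n).toNat else 0
  let R : Nat := if n > 0 then n.toNat else 0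
  let left := x.foldl (fun lft a => (sweepB a 1 lft).1) (List.replicate L 0)
  let r0 := y.foldl (fun t b => t + b) 0
  let rest := (x.zip y).foldl (fun r ab => (sweepB ab.1 ab.2 r).1) (List.replicate R 0)
  (left, r0 :: rest)

-- ===== PRECONDITION & SPEC =====
def Spec_calc_terms (n : Int) (x : List Int) (y : List Int) (out : List Int × List Int) : Prop := out = calc_terms_alt n x y
instance (n : Int) (x : List Int) (y : List Int) (out : List Int × List Int) : Decidable (Spec_calc_terms n x y out) := by unfold Spec_calc_terms; infer_instance

-- ===== CLAIM (what is proved, stated in full; the proofs are below) =====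
def Claim_equal_calc_terms : Prop := ∀ (n : Int) (x : List Int) (y : List Int), Dom_calc_terms n x y → Spec_calc_terms n x y (calc_terms n x y)

-- ===== LEMMAS AND PROOFS =====

def powSum (x : List Int) (e : Nat) : Int := (x.map (fun a => a ^ e)).sum
def crossSum (l : List (Int × Int)) (e : Nat) : Int := (l.map (fun ab => ab.1 ^ e * ab.2)).sum

theorem foldl_append_singleton {α β : Type} (f : α → β) :
    ∀ (l : List α) (init : List β),
    l.foldl (fun acc i => acc ++ [f i]) init = init ++ l.map f := by
  intro l
  induction l with
  | nil => simp
  | cons a l ih => intro init; simp [List.foldl_cons, ih]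

theorem foldl_add_sum {α : Type} (g : α → Int) :
    ∀ (l : List α) (init : Int),
    l.foldl (fun t a => t + g a) init = init + (l.map g).sum := by
  intro l
  induction l with
  | nil => simp
  | cons a l ih => intro init; simp [List.foldl_cons, ih]; ring

theorem zip_replicate_right_self : ∀ (x : List Int),
    x.zip (List.replicate x.length (1 : Int)) = x.map (fun a => (a, 1)) := by
  intro x
  induction x with
  | nil => rfl
  | cons a x ih => simp [List.replicate_succ, ih]

theorem zip_replicate_left_self : ∀ (y : List Int),
    (List.replicate y.length (1 : Int)).zip y = y.map (fun b => ((1 : Int), b)) := by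
  intro y
  induction y with
  | nil => rfl
  | cons b y ih => simp [List.replicate_succ, ih]

theorem pySumA_left (x : List Int) (i : Int) :
    pySumA (some x) none i 1 = powSum x i.toNat := by
  simp [pySumA, zip_replicate_right_self, List.foldl_map, foldl_add_sum, powSum]

theorem foldl_plus : ∀ (l : List Int) (init : Int),
    l.foldl (fun t b => t + b) init = init + l.sum := by
  intro l
  induction l with
  | nil => simp
  | cons b l ih => intro init; simp [List.foldl_cons, ih]; ring

theorem pySumA_right0 (y : List Int) :
    pySumA none (some y) 1 1 = y.sum := by
  simp [pySumA, zip_replicate_left_self, List.foldl_map, foldl_plus]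

theorem pySumA_cross (x y : List Int) (i : Int) :
    pySumA (some x) (some y) i 1 = crossSum (x.zip y) i.toNat := by
  simp [pySumA, foldl_add_sum, crossSum]

theorem sweepB_spec (a p0 : Int) (g : Nat → Int) :
    ∀ (m : Nat),
    sweepB a p0 ((List.range m).map g)
      = ((List.range m).map (fun k => g k + p0 * a ^ (k + 1)), p0 * a ^ m) := by
  intro m
  induction m with
  | zero => simp [sweepB]
  | succ m ih =>
      have h : sweepB a p0 ((List.range (m+1)).map g)
          = ((sweepB a p0 ((List.range m).map g)).1 ++
              [g m + (sweepB a p0 ((List.range m).map g)).2 * a],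
             (sweepB a p0 ((List.range m).map g)).2 * a) := by
        simp [sweepB, List.range_succ]
      rw [h, ih]
      simp [List.range_succ, pow_succ]
      ring

theorem outer_left (x : List Int) :
    ∀ (m : Nat) (g : Nat → Int),
    x.foldl (fun lft a => (sweepB a 1 lft).1) ((List.range m).map g)
      = (List.range m).map (fun k => g k + powSum x (k + 1)) := by
  induction x with
  | nil =>
      intro m g
      have : (fun k => g k + powSum [] (k + 1)) = g := by
        funext k; simp [powSum]
      simp [this]
  | cons a x ih =>
      intro m g
      rw [List.foldl_cons, sweepB_spec, ih]
      apply List.map_congr_left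
      intro k _
      simp [powSum]
      ring

theorem outer_cross (l : List (Int × Int)) :
    ∀ (m : Nat) (g : Nat → Int),
    l.foldl (fun r ab => (sweepB ab.1 ab.2 r).1) ((List.range m).map g)
      = (List.range m).map (fun k => g k + crossSum l (k + 1)) := by
  induction l with
  | nil =>
      intro m g
      have : (fun k => g k + crossSum [] (k + 1)) = g := by
        funext k; simp [crossSum]
      simp [this]
  | cons ab l ih =>
      intro m g
      rw [List.foldl_cons, sweepB_spec, ih]
      apply List.map_congr_left
      intro k _
      simp [crossSum]
      ring

theorem replicate_eq_range_map (m : Nat) :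
    List.replicate m (0 : Int) = (List.range m).map (fun _ => 0) := by
  simp [List.map_const']

-- ===== VERDICT (by name: the statement is the Claim_ definition above) =====
theorem calc_terms_spec : Claim_equal_calc_terms := by
  intro n x y _
  unfold Spec_calc_terms calc_terms calc_terms_alt
  have hL : (if n > 0 then (2*n).toNat else 0) = (2*n).toNat := by split <;> omega
  have hR : (if n > 0 then n.toNat else 0) = n.toNat := by split <;> omega
  dsimp only
  rw [hL, hR, replicate_eq_range_map, replicate_eq_range_map, outer_left, outer_cross]
  simp only [Prod.mk.injEq]
  constructor
  · -- left lists
    rw [foldl_append_singleton, PySem.List.pyRange_one]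
    have h1 : (2*n + 1 - 1 : Int).toNat = (2*n).toNat := by omega
    rw [h1, List.map_map]
    apply List.map_congr_left
    intro k hk
    simp [pySumA_left]
    congr 1
    omega
  · -- right lists
    rw [foldl_append_singleton, PySem.List.pyRange_one]
    have h1 : (n + 1 - 1 : Int).toNat = n.toNat := by omega
    rw [h1, List.map_map, pySumA_right0]
    have h2 : y.sum = y.foldl (fun t b => t + b) 0 := by
      rw [foldl_plus]; ring
    rw [← h2, List.singleton_append]
    congr 1
    apply List.map_congr_left
    intro k hk
    simp [pySumA_cross]
    congr 1
    omega
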